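-- pv_equiv track=rewrite | github.com/pypi-data/pypi-mirror-402 | packages/LHCbDIRAC/lhcbdirac-12.0.5-py3-none-any.whl/LHCbDIRAC/BookkeepingSystem/Client/objects.py | prepend
-- ===== SOURCE A (Python) =====
-- def prepend(string, indent="___"):
--     """add string."""
--     string = string.strip("\n")
--     tokens = string.split("\n")
--     newstr = ""
--     for token in tokens[0:-1]:
--         newstr += indent + token + "\n"
--     newstr += indent + tokens[-1]
--     return newstr
-- ===== SOURCE B (Python) =====
-- def prepend(string, indent="___"):
--     """add string."""
--     s = string.strip("\n")
--     return indent + s.replace("\n", "\n" + indent)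
-- ===== Notes on version B (the rewrite author's own statement) =====
-- stated objective: simpler
-- what changed: B drops the split-into-tokens loop with repeated string concatenation and computes the result as one substitution: strip the newlines, prepend the indent once, and replace every internal newline by newline+indent.
import Mathlib
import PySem

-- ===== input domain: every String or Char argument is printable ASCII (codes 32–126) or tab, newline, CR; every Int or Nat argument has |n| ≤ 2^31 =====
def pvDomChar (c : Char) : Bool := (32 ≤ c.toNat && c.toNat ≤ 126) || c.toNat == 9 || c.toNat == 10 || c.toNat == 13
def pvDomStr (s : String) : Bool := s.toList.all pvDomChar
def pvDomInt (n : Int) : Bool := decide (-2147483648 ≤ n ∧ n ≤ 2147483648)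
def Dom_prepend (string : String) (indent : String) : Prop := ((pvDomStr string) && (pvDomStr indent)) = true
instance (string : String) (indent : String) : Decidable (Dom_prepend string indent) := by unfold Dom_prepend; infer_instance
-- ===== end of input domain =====

-- B replaces A's split-into-tokens loop by one strip + one replace; objective: simpler.

-- ===== PORT A =====
-- literal port of A over code points (PySem.Chars is exact on the stated ASCII domain):
-- strip "\n", split on "\n", loop over tokens[0:-1] concatenating, then append indent + tokens[-1].
-- tokens[-1] uses pyGet? with .getD []: split always returns a nonempty list, so the default is unreachable.
def prepend (string : String) (indent : String) : String :=
  let s := PySem.Chars.stripChars string.toList ['\n']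
  let tokens := PySem.Chars.splitOn s ['\n']
  let newstr := (PySem.List.slice tokens (some 0) (some (-1))).foldl
      (fun acc tok => acc ++ indent.toList ++ tok ++ ['\n']) []
  String.ofList (newstr ++ indent.toList ++ (PySem.List.pyGet? tokens (-1)).getD [])

-- ===== PORT B =====
-- literal port of B: indent + stripped.replace("\n", "\n" + indent)
def prepend_alt (string : String) (indent : String) : String :=
  let s := PySem.Chars.stripChars string.toList ['\n']
  String.ofList (indent.toList ++ PySem.Chars.replace s ['\n'] ('\n' :: indent.toList))

-- ===== PRECONDITION & SPEC =====
def Spec_prepend (string : String) (indent : String) (out : String) : Prop := out = prepend_alt string indent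
instance (string : String) (indent : String) (out : String) : Decidable (Spec_prepend string indent out) := by unfold Spec_prepend; infer_instance

-- ===== CLAIM (what is proved, stated in full; the proofs are below) =====
def Claim_equal_prepend : Prop := ∀ (string : String) (indent : String), Dom_prepend string indent → Spec_prepend string indent (prepend string indent)

-- ===== LEMMAS AND PROOFS =====

-- structural version of replace with a fixed single-char pattern '\n'
def pvRepl (nw : List Char) : List Char → List Char
  | [] => []
  | c :: t => if c = '\n' then nw ++ pvRepl nw t else c :: pvRepl nw t

-- structural version of splitOn.go's token accumulation
def pvTok : List Char → List Char → List (List Char)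
  | [], cur => [cur.reverse]
  | c :: t, cur => if c = '\n' then cur.reverse :: pvTok t [] else pvTok t (c :: cur)

theorem pvTok_ne_nil (l cur : List Char) : pvTok l cur ≠ [] := by
  induction l generalizing cur with
  | nil => simp [pvTok]
  | cons c t ih => by_cases h : c = '\n' <;> simp [pvTok, h, ih]

theorem replace_go_eq (nw : List Char) (l : List Char) (fuel : Nat)
    (h : l.length ≤ fuel) (acc : List Char) :
    PySem.Chars.replace.go ['\n'] nw fuel l acc = acc.reverse ++ pvRepl nw l := by
  induction fuel generalizing l acc with
  | zero =>
      have : l = [] := by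
        cases l with
        | nil => rfl
        | cons c t => simp at h
      subst this
      simp [PySem.Chars.replace.go, pvRepl]
  | succ n ih =>
      cases l with
      | nil => simp [PySem.Chars.replace.go, pvRepl]
      | cons c t =>
          by_cases hc : c = '\n'
          · subst hc
            have hgo : PySem.Chars.replace.go ['\n'] nw (n+1) ('\n'::t) acc
                = PySem.Chars.replace.go ['\n'] nw n t (nw.reverse ++ acc) := by
              simp [PySem.Chars.replace.go, List.isPrefixOf]
            rw [hgo, ih t (by simpa using Nat.le_of_succ_le_succ h) (nw.reverse ++ acc)]
            simp [pvRepl]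
          · have hbeq : (c == '\n') = false := by simpa using hc
            have hgo : PySem.Chars.replace.go ['\n'] nw (n+1) (c::t) acc
                = PySem.Chars.replace.go ['\n'] nw n t (c :: acc) := by
              simp only [PySem.Chars.replace.go, List.isPrefixOf]
              rw [if_neg (by simp [Ne.symm hc])]
            rw [hgo, ih t (by simpa using Nat.le_of_succ_le_succ h) (c :: acc)]
            simp [pvRepl, hc]

theorem splitOn_go_eq (l : List Char) (fuel : Nat) (h : l.length ≤ fuel)
    (cur : List Char) (acc : List (List Char)) :
    PySem.Chars.splitOn.go ['\n'] fuel l cur acc = acc.reverse ++ pvTok l cur := by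
  induction fuel generalizing l cur acc with
  | zero =>
      have : l = [] := by
        cases l with
        | nil => rfl
        | cons c t => simp at h
      subst this
      simp [PySem.Chars.splitOn.go, pvTok]
  | succ n ih =>
      cases l with
      | nil => simp [PySem.Chars.splitOn.go, pvTok]
      | cons c t =>
          by_cases hc : c = '\n'
          · subst hc
            have hgo : PySem.Chars.splitOn.go ['\n'] (n+1) ('\n'::t) cur acc
                = PySem.Chars.splitOn.go ['\n'] n t [] (cur.reverse :: acc) := by
              simp [PySem.Chars.splitOn.go, List.isPrefixOf]
            rw [hgo, ih t (by simpa using Nat.le_of_succ_le_succ h) [] (cur.reverse :: acc)]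
            simp [pvTok]
          · have hbeq : (c == '\n') = false := by simpa using hc
            have hgo : PySem.Chars.splitOn.go ['\n'] (n+1) (c::t) cur acc
                = PySem.Chars.splitOn.go ['\n'] n t (c :: cur) acc := by
              simp only [PySem.Chars.splitOn.go, List.isPrefixOf]
              rw [if_neg (by simp [Ne.symm hc])]
            rw [hgo, ih t (by simpa using Nat.le_of_succ_le_succ h) (c :: cur) acc]
            simp [pvTok, hc]

theorem pyGet?_neg_one {α : Type} (xs : List α) :
    PySem.List.pyGet? xs (-1) = xs.getLast? := by
  cases xs with
  | nil => simp [PySem.List.pyGet?, PySem.List.pyIdx?]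
  | cons x t =>
      simp only [PySem.List.pyGet?, PySem.List.pyIdx?]
      have h1 : ¬ (0 : Int) ≤ -1 := by omega
      have h2 : -((x :: t).length : Int) ≤ -1 := by
        simp only [List.length_cons]; omega
      simp only [if_neg h1, if_pos h2, Option.bind]
      simp [List.getLast?_eq_getElem?]

theorem slice_zero_neg_one {α : Type} (xs : List α) :
    PySem.List.slice xs (some 0) (some (-1)) = xs.dropLast := by
  simp only [PySem.List.slice]
  have h0 : PySem.List.clampIdx xs.length 0 = 0 := by
    simp [PySem.List.clampIdx]
  have h1 : PySem.List.clampIdx xs.length (-1) = xs.length - 1 := by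
    simp only [PySem.List.clampIdx]
    split_ifs <;> omega
  rw [h0, h1]
  simp [List.dropLast_eq_take]

theorem foldl_indent (ind : List Char) (l : List (List Char)) (a : List Char) :
    l.foldl (fun acc tok => acc ++ ind ++ tok ++ ['\n']) a
      = a ++ l.flatMap (fun tok => ind ++ tok ++ ['\n']) := by
  induction l generalizing a with
  | nil => simp
  | cons x xs ih => simp [List.flatMap_def]

-- the value A assembles from a token list
def pvGlue (ind : List Char) (ts : List (List Char)) : List Char :=
  ts.dropLast.flatMap (fun tok => ind ++ tok ++ ['\n']) ++ ind ++ (ts.getLast?).getD []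

theorem glue_tok (ind : List Char) (l cur : List Char) :
    pvGlue ind (pvTok l cur) = ind ++ cur.reverse ++ pvRepl ('\n' :: ind) l := by
  induction l generalizing cur with
  | nil => simp [pvTok, pvGlue, pvRepl]
  | cons c t ih =>
      by_cases hc : c = '\n'
      · subst hc
        have hne := pvTok_ne_nil t []
        simp only [pvTok, pvRepl, if_true]
        have hdrop : (cur.reverse :: pvTok t []).dropLast = cur.reverse :: (pvTok t []).dropLast := by
          cases h : pvTok t [] with
          | nil => exact absurd h hne
          | cons a b => simp
        have hlast : (cur.reverse :: pvTok t []).getLast? = (pvTok t []).getLast? := by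
          cases h : pvTok t [] with
          | nil => exact absurd h hne
          | cons a b => simp [List.getLast?_cons_cons]
        simp only [pvGlue]
        rw [hdrop, hlast, List.flatMap_cons]
        have ih0 := ih ([] : List Char)
        simp only [pvGlue, List.reverse_nil, List.append_nil] at ih0
        simp only [List.append_assoc] at ih0 ⊢
        simp [ih0]
      · simp only [pvTok, pvRepl, if_neg hc]
        rw [ih (c :: cur)]
        simp

-- ===== VERDICT (by name: the statement is the Claim_ definition above) =====
theorem prepend_spec : Claim_equal_prepend := by
  intro string indent _
  unfold Spec_prepend prepend prepend_alt
  simp only [PySem.Chars.splitOn, PySem.Chars.replace]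
  set s := PySem.Chars.stripChars string.toList ['\n'] with hs
  have hsplit := splitOn_go_eq s (s.length + 1) (by omega) [] []
  have hrepl := replace_go_eq ('\n' :: indent.toList) s s.length (le_refl _) []
  simp only [List.reverse_nil, List.nil_append] at hsplit hrepl
  rw [hsplit, show (['\n'] : List Char).isEmpty = false from rfl]
  simp only [Bool.false_eq_true, if_false, hrepl]
  rw [slice_zero_neg_one, foldl_indent, pyGet?_neg_one]
  have hg := glue_tok indent.toList s []
  simp only [List.reverse_nil, List.append_nil] at hg
  rw [List.nil_append]
  exact congrArg String.ofList hg
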